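-- pv_equiv track=rewrite | github.com/moura-pedro/spring-2024 | intro to ana/hw3/huffman_encoder.py | process_word
-- ===== SOURCE A (Python) =====
-- alphabets = "abcdefghijklmnopqrstuvwxyzABCDEFGHIJKLMNOPQRSTUVWXYZ"
--
-- def process_word(word):
--     frontlist = list()
--     i = 0
--     while i < len(word) and word[i] not in alphabets:
--         frontlist = frontlist + list(word[i])
--         i += 1
--
--     endlist = list()
--     start = i
--     j = len(word) - 1
--     while j >= i and word[j] not in alphabets:
--         endlist = list(word[j])	+ endlist
--         j -= 1
--
--     wrd = ''
--     if i <= j: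
--         wrd = word[i:j+1]
--
--     wordlist = list()
--     if frontlist != list():
--         wordlist = wordlist + frontlist
--     if wrd != '':
--         wordlist = wordlist + [wrd]
--     if endlist != list():
--         wordlist= wordlist + endlist
--
--     return wordlist
-- ===== SOURCE B (Python) =====
-- alphabets = "abcdefghijklmnopqrstuvwxyzABCDEFGHIJKLMNOPQRSTUVWXYZ"
--
-- def process_word(word):
--     mask = [c in alphabets for c in word]
--     if True not in mask:
--         return list(word)
--     i = mask.index(True)
--     j = len(word) - 1 - mask[::-1].index(True)
--     return list(word[:i]) + [word[i:j + 1]] + list(word[j + 1:])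
-- ===== Notes on version B (the rewrite author's own statement) =====
-- stated objective: simpler
-- what changed: Replaces A's two incremental index-walking while-loops with list-concatenation accumulators by a one-pass boolean alpha mask whose first/last True indices give closed-form slices for the front chars, the core word, and the trailing chars.
import Mathlib
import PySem

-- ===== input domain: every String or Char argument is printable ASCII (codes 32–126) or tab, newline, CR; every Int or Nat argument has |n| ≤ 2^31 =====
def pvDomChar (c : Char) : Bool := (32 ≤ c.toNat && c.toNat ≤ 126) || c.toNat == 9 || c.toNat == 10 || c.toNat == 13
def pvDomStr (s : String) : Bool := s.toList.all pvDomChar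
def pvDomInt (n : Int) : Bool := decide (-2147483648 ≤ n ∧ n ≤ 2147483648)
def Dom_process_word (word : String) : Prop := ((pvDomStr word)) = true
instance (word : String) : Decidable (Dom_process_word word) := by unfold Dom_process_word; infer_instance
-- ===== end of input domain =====

-- B replaces A's two incremental index-walking while-loops by a one-pass
-- boolean alpha mask whose first/last True indices give closed-form slices (objective: simpler).

-- ===== PORT A =====
def pvAlphaStr : List Char := "abcdefghijklmnopqrstuvwxyzABCDEFGHIJKLMNOPQRSTUVWXYZ".toList

-- A's first while loop: scan forward over leading non-alphabetic chars
def pvFrontA (cs : List Char) (i : Nat) (acc : List String) : List String × Nat :=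
  if h : i < cs.length then
    if pvAlphaStr.contains cs[i] then (acc, i)
    else pvFrontA cs (i + 1) (acc ++ [String.ofList [cs[i]]])
  else (acc, i)
termination_by cs.length - i

-- A's second while loop: scan backward over trailing non-alphabetic chars (j may end at -1)
def pvEndA (cs : List Char) (i : Nat) (j : Int) (acc : List String) : List String × Int :=
  if h : (i : Int) ≤ j then
    let c := cs.getD j.toNat ' '   -- j is always in range on A's actual calls
    if pvAlphaStr.contains c then (acc, j)
    else pvEndA cs i (j - 1) (String.ofList [c] :: acc)
  else (acc, j)
termination_by (j + 1 - (i : Int)).toNat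
decreasing_by omega

def process_word (word : String) : List String :=
  let cs := word.toList
  let fr := pvFrontA cs 0 []
  let frontlist := fr.1
  let i := fr.2
  let en := pvEndA cs i ((cs.length : Int) - 1) []
  let endlist := en.1
  let j := en.2
  let wrd := if (i : Int) ≤ j then String.ofList ((cs.drop i).take (j + 1 - i).toNat) else ""
  let w1 : List String := if frontlist ≠ [] then [] ++ frontlist else []
  let w2 : List String := if wrd ≠ "" then w1 ++ [wrd] else w1
  if endlist ≠ [] then w2 ++ endlist else w2

-- ===== PORT B =====
def process_word_alt (word : String) : List String :=
  let cs := word.toList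
  let mask := cs.map (fun c => pvAlphaStr.contains c)
  if mask.contains true = false then
    cs.map (fun c => String.ofList [c])
  else
    let i := mask.idxOf true
    let j := cs.length - 1 - mask.reverse.idxOf true
    (cs.take i).map (fun c => String.ofList [c])
      ++ [String.ofList ((cs.drop i).take (j + 1 - i))]
      ++ (cs.drop (j + 1)).map (fun c => String.ofList [c])

-- ===== PRECONDITION & SPEC =====
def Spec_process_word (word : String) (out : List String) : Prop := out = process_word_alt word
instance (word : String) (out : List String) : Decidable (Spec_process_word word out) := by unfold Spec_process_word; infer_instance

-- ===== CLAIM (what is proved, stated in full; the proofs are below) =====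
def Claim_equal_process_word : Prop := ∀ (word : String), Dom_process_word word → Spec_process_word word (process_word word)

-- ===== LEMMAS AND PROOFS =====

-- non-alphabetic predicate used by the proofs
def pvQ (c : Char) : Bool := !pvAlphaStr.contains c

theorem pvFrontA_eq (cs : List Char) : ∀ (i : Nat) (acc : List String),
    pvFrontA cs i acc =
      (acc ++ ((cs.drop i).takeWhile pvQ).map (fun c => String.ofList [c]),
       i + ((cs.drop i).takeWhile pvQ).length) := by
  intro i acc
  fun_induction pvFrontA cs i acc with
  | case1 i acc h hc =>
    rw [List.drop_eq_getElem_cons h]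
    simp only [List.takeWhile_cons, pvQ, hc]
    simp
  | case2 i acc h hc ih =>
    have hc' : pvAlphaStr.contains cs[i] = false := by simpa using hc
    rw [List.drop_eq_getElem_cons h]
    simp only [List.takeWhile_cons, pvQ, hc', Bool.not_false, if_pos]
    rw [ih]
    refine Prod.ext (by simp) (by simp; omega)
  | case3 i acc h =>
    rw [List.drop_eq_nil_of_le (by omega)]
    simp

theorem pvSegDecomp (cs : List Char) (i jn : Nat) (hi : i ≤ jn) (hj : jn < cs.length) :
    ((cs.take (jn + 1)).drop i) = ((cs.take jn).drop i) ++ [cs[jn]] := by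
  rw [List.take_add_one, List.getElem?_eq_getElem hj]
  rw [List.drop_append_of_le_length (by simp; omega)]
  simp

theorem pvEndA_eq (cs : List Char) : ∀ (i : Nat) (j : Int) (acc : List String),
    j < cs.length → (i : Int) ≤ j + 1 →
    pvEndA cs i j acc =
      ((((cs.take (j + 1).toNat).drop i).reverse.takeWhile pvQ).reverse.map (fun c => String.ofList [c]) ++ acc,
       j - (((cs.take (j + 1).toNat).drop i).reverse.takeWhile pvQ).length) := by
  intro i j acc hjn hij
  fun_induction pvEndA cs i j acc with
  | case1 j acc h c hc =>
    have h0 : (0:Int) ≤ j := le_trans (Int.natCast_nonneg i) h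
    have hj1 : (j + 1).toNat = j.toNat + 1 := by omega
    have hjl : j.toNat < cs.length := by omega
    have hg : cs.getD j.toNat ' ' = cs[j.toNat] := List.getD_eq_getElem cs ' ' hjl
    have hcq : pvQ cs[j.toNat] = false := by
      simp only [pvQ]; rw [← hg, hc]; rfl
    rw [hj1, pvSegDecomp cs i j.toNat (by omega) hjl]
    simp [hcq]
  | case2 j acc h c hc ih =>
    have h0 : (0:Int) ≤ j := le_trans (Int.natCast_nonneg i) h
    have hj1 : (j + 1).toNat = j.toNat + 1 := by omega
    have hjl : j.toNat < cs.length := by omega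
    have hg : cs.getD j.toNat ' ' = cs[j.toNat] := List.getD_eq_getElem cs ' ' hjl
    have hc' : pvAlphaStr.contains (cs.getD j.toNat ' ') = false := Bool.not_eq_true _ ▸ hc
    have hcq : pvQ cs[j.toNat] = true := by
      simp only [pvQ]; rw [← hg, hc']; rfl
    have hj2 : (j - 1 + 1).toNat = j.toNat := by omega
    rw [ih (by omega) (by omega), hj2]
    rw [hj1, pvSegDecomp cs i j.toNat (by omega) hjl]
    simp only [List.reverse_append, List.reverse_cons, List.reverse_nil, List.nil_append,
      List.singleton_append, List.takeWhile_cons, hcq, if_pos]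
    refine Prod.ext ?_ ?_
    · simp; exact congrArg (fun x => String.ofList [x]) hg
    · simp; push_cast; omega
  | case3 j acc h =>
    have hd : (cs.take (j + 1).toNat).drop i = [] :=
      List.drop_eq_nil_of_le (le_trans (by simp) (by omega : (j+1).toNat ≤ i))
    rw [hd]
    simp

theorem pvIdxOf_mask (p : Char → Bool) (cs : List Char) :
    (cs.map p).idxOf true = (cs.takeWhile (fun c => !p c)).length := by
  induction cs with
  | nil => simp
  | cons c t ih =>
    simp only [List.map_cons, List.takeWhile_cons, List.idxOf_cons]
    cases h : p c <;> simp [ih]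

theorem pvTakeWhile_append (q : Char → Bool) (l₁ l₂ : List Char)
    (h : ∃ x ∈ l₁, q x = false) :
    (l₁ ++ l₂).takeWhile q = l₁.takeWhile q := by
  induction l₁ with
  | nil => simp at h
  | cons c t ih =>
    simp only [List.cons_append, List.takeWhile_cons]
    rcases h with ⟨x, hx, hq⟩
    rcases List.mem_cons.1 hx with rfl | hxt
    · simp [hq]
    · cases hc : q c <;> simp [ih ⟨x, hxt, hq⟩]

theorem pvTakeWhile_lt (q : Char → Bool) (l : List Char)
    (h : ∃ x ∈ l, q x = false) :
    (l.takeWhile q).length < l.length := by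
  rcases Nat.lt_or_ge (l.takeWhile q).length l.length with h' | h'
  · exact h'
  · exfalso
    have hle := (List.takeWhile_prefix (l := l) q).length_le
    have heq : l.takeWhile q = l :=
      List.IsPrefix.eq_of_length (List.takeWhile_prefix q) (le_antisymm hle h')
    rcases h with ⟨x, hx, hq⟩
    have := List.mem_takeWhile_imp (heq ▸ hx)
    simp [hq] at this

theorem pvTakeWhile_getElem (q : Char → Bool) : ∀ (l : List Char) (h : (l.takeWhile q).length < l.length),
    q (l[(l.takeWhile q).length]'h) = false := by
  intro l
  induction l with
  | nil => simp
  | cons c t ih =>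
    intro h
    by_cases hc : q c = true
    · simp only [List.takeWhile_cons, hc, if_pos, List.length_cons, List.getElem_cons_succ] at h ⊢
      exact ih (by omega)
    · have hc' : q c = false := by revert hc; cases q c <;> simp
      simp [hc']

theorem pvAssemble (F E : List String) (w : String) (hw : w ≠ "") :
    (if E ≠ [] then
        (if w ≠ "" then (if F ≠ [] then F else []) ++ [w] else (if F ≠ [] then F else [])) ++ E
      else
        (if w ≠ "" then (if F ≠ [] then F else []) ++ [w] else (if F ≠ [] then F else []))) =
      F ++ [w] ++ E := by
  by_cases hf : F = [] <;> by_cases he : E = [] <;> simp [hf, he, hw]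

theorem pvMain (word : String) : process_word word = process_word_alt word := by
  simp only [process_word, process_word_alt]
  set cs := word.toList with hcs
  have hq : (fun c => !pvAlphaStr.contains c) = pvQ := by funext c; simp [pvQ]
  by_cases hc : (cs.map (fun c => pvAlphaStr.contains c)).contains true = false
  · -- no alphabetic character
    have hall : ∀ c ∈ cs, pvQ c = true := by
      intro c hm
      simp at hc
      simp [pvQ, hc c hm]
    have htw : cs.takeWhile pvQ = cs := List.takeWhile_eq_self_iff.mpr hall
    rw [pvFrontA_eq]
    simp only [List.drop_zero, htw, Nat.zero_add]
    rw [pvEndA]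
    rw [dif_neg (by omega)]
    have hng : ¬((cs.length : Int) ≤ (cs.length : Int) - 1) := by omega
    simp only [if_neg hng]
    rw [if_pos hc]
    by_cases hnil : cs = [] <;> simp [hnil]
  · -- at least one alphabetic character
    have hex : ∃ x ∈ cs, pvQ x = false := by
      simp at hc
      rcases hc with ⟨x, hx, hpx⟩
      exact ⟨x, hx, by simp [pvQ, hpx]⟩
    set L := (cs.takeWhile pvQ).length with hLdef
    set R := (cs.reverse.takeWhile pvQ).length with hRdef
    have hLlt : L < cs.length := pvTakeWhile_lt pvQ cs hex
    have hgetL : pvQ (cs[L]'hLlt) = false := pvTakeWhile_getElem pvQ cs hLlt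
    have hdropL : cs.drop L = cs[L] :: cs.drop (L + 1) := List.drop_eq_getElem_cons hLlt
    have hexdrop : ∃ x ∈ (cs.drop L).reverse, pvQ x = false :=
      ⟨cs[L], by rw [List.mem_reverse, hdropL]; exact List.mem_cons.mpr (Or.inl rfl), hgetL⟩
    have hrevsplit : cs.reverse = (cs.drop L).reverse ++ (cs.take L).reverse := by
      rw [← List.reverse_append, List.take_append_drop]
    have hr : (cs.drop L).reverse.takeWhile pvQ = cs.reverse.takeWhile pvQ := by
      rw [hrevsplit, pvTakeWhile_append pvQ _ _ hexdrop]
    have hRlt : R < cs.length - L := by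
      have h1 := pvTakeWhile_lt pvQ (cs.drop L).reverse hexdrop
      rw [hr] at h1
      simpa using h1
    have htwL : cs.takeWhile pvQ = cs.take L := by
      rw [hLdef]; exact List.prefix_iff_eq_take.mp (List.takeWhile_prefix pvQ)
    have hrtake : cs.reverse.takeWhile pvQ = cs.reverse.take R := by
      rw [hRdef]; exact List.prefix_iff_eq_take.mp (List.takeWhile_prefix pvQ)
    have hrrev : (cs.reverse.takeWhile pvQ).reverse = cs.drop (cs.length - R) := by
      rw [hrtake, List.take_reverse]
      simp
    rw [pvFrontA_eq]
    simp only [List.drop_zero, Nat.zero_add]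
    have hEnd := pvEndA_eq cs L ((cs.length : Int) - 1) [] (by omega) (by omega)
    have ht1 : ((cs.length : Int) - 1 + 1).toNat = cs.length := by omega
    rw [ht1, List.take_length] at hEnd
    rw [hEnd, hr]
    rw [if_pos (by omega : ((L : Int)) ≤ (cs.length : Int) - 1 - (R : Int))]
    rw [if_neg hc]
    have hmask : (cs.map (fun c => pvAlphaStr.contains c)).idxOf true = L := by
      rw [pvIdxOf_mask, hq, hLdef]
    have hmaskrev : (cs.map (fun c => pvAlphaStr.contains c)).reverse.idxOf true = R := by
      rw [← List.map_reverse, pvIdxOf_mask, hq, hRdef]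
    rw [hmask, hmaskrev]
    have htoNat : ((cs.length : Int) - 1 - (R : Int) + 1 - (L : Int)).toNat = cs.length - 1 - R + 1 - L := by
      omega
    rw [htoNat]
    have hwne : String.ofList ((cs.drop L).take (cs.length - 1 - R + 1 - L)) ≠ "" := by
      intro h
      have h2 := congrArg String.toList h
      simp at h2
      omega
    rw [hrrev]
    have hj1 : cs.length - 1 - R + 1 = cs.length - R := by omega
    rw [hj1]
    simp only [List.append_nil, List.nil_append, htwL]
    have hlt : (List.take L cs).length = L := List.length_take_of_le (le_of_lt hLlt)
    rw [hlt]
    have heq2 : cs.length - 1 - R + 1 - L = cs.length - R - L := by omega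
    rw [heq2] at hwne
    exact pvAssemble _ _ _ hwne

-- ===== VERDICT (by name: the statement is the Claim_ definition above) =====
theorem process_word_spec : Claim_equal_process_word := by
  intro word _
  exact pvMain word
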